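-- pv_equiv track=rewrite | github.com/marcus-elia/toom-cook-python | Polynomial_Multiplication.py | evaluate_blocks
-- ===== SOURCE A (Python) =====
-- def evaluate_blocks(blocks, value):
--     """ blocks is a list of lists, each list is the coefficients of a
--         polynomial. But each list a coefficient. For example, if blocks is
--         [[1,2],[3,4],[5,6]] and value is -2, we return
--         [1,2] + [-6,-8] + [20,24] = [15, 18].  If the value is infinity,
--         we return the leading coefficient."""
--
--     if value == 'infinity':
--         return blocks[-1]
--
--     # initialize an empty of the right length
--     answer = [0 for _ in range(len(blocks[0]))]
--
--     coefficient = 1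
--     for i in range(len(blocks)):
--         for j in range(len(blocks[0])):
--             answer[j] += coefficient*blocks[i][j]
--         coefficient *= value    # multiply to make powers of value
--     return answer
-- ===== SOURCE B (Python) =====
-- def evaluate_blocks(blocks, value):
--     # Column-wise: for each coefficient position j, Horner-evaluate the
--     # column [row[j] for row in blocks] at `value` and append the scalar.
--     if value == 'infinity':
--         return blocks[-1]
--     width = len(blocks[0])
--     out = []
--     for j in range(width):
--         s = 0
--         for row in reversed(blocks):
--             s = s * value + row[j]
--         out.append(s)
--     return out
-- ===== Notes on version B (the rewrite author's own statement) =====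
-- stated objective: alternative
-- what changed: Replaced A's row-wise forward loop with an explicit power accumulator by a column-wise traversal: for each coefficient index j it Horner-evaluates the j-th column of the blocks at value, eliminating both the vector accumulator and the coefficient variable.
import Mathlib
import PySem

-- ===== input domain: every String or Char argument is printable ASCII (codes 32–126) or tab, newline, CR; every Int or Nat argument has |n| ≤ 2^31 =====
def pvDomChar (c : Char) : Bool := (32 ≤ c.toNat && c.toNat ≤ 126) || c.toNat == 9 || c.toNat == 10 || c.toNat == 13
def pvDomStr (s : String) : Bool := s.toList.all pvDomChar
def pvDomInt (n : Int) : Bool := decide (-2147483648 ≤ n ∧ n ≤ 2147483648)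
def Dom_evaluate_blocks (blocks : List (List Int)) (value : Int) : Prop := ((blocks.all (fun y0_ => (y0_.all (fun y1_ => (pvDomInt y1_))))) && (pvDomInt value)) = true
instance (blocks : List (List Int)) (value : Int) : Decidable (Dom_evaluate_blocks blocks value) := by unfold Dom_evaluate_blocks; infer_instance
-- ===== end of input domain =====

-- B replaces A's row-wise forward loop with an explicit power accumulator by a
-- column-wise traversal that Horner-evaluates each coefficient column (alternative decomposition, same cost).


-- ===== PORT A =====
-- Port of A. `value` is an Int here, so Python's `value == 'infinity'` branch is
-- always False and is dropped. `len(blocks[0])` (raises IndexError on []) is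
-- ported via headD; the inner loop `for j: answer[j] += coefficient*blocks[i][j]`
-- is zipWith over the width-w answer and the row — exact under Pre_ (each row at
-- least as long as blocks[0]); where a row is shorter Python raises (excluded).
def evaluate_blocks (blocks : List (List Int)) (value : Int) : List Int :=
  let answer : List Int := List.replicate (blocks.headD []).length 0
  (blocks.foldl
    (fun (st : List Int × Int) row =>
      (List.zipWith (fun a b => a + st.2 * b) st.1 row, st.2 * value))
    (answer, 1)).1

-- ===== PORT B =====
-- Port of B: for each column index j, Horner-evaluate the j-th column of the
-- blocks (reversed traversal = foldr). `row[j]` is in range under Pre_; ported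
-- as getD (exact there).
def evaluate_blocks_alt (blocks : List (List Int)) (value : Int) : List Int :=
  (List.range (blocks.headD []).length).map (fun j =>
    blocks.foldr (fun row s => s * value + row.getD j 0) 0)

-- ===== PRECONDITION & SPEC =====
-- Pre_: exactly where Python A returns: blocks nonempty (else len(blocks[0])
-- raises IndexError) and every row at least as long as blocks[0] (else the inner
-- indexing blocks[i][j] raises IndexError).
def Pre_evaluate_blocks (blocks : List (List Int)) (value : Int) : Prop :=
  blocks ≠ [] ∧ ∀ r ∈ blocks, (blocks.headD []).length ≤ r.length
instance (blocks : List (List Int)) (value : Int) : Decidable (Pre_evaluate_blocks blocks value) := by unfold Pre_evaluate_blocks; infer_instance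
def pvWitness_evaluate_blocks : List (List Int) × Int := ([[1, 2], [3, 4], [5, 6]], -2)

def Spec_evaluate_blocks (blocks : List (List Int)) (value : Int) (out : List Int) : Prop := out = evaluate_blocks_alt blocks value
instance (blocks : List (List Int)) (value : Int) (out : List Int) : Decidable (Spec_evaluate_blocks blocks value out) := by unfold Spec_evaluate_blocks; infer_instance

-- ===== CLAIM =====
def Claim_equal_evaluate_blocks : Prop := ∀ (blocks : List (List Int)) (value : Int), Dom_evaluate_blocks blocks value → Pre_evaluate_blocks blocks value → Spec_evaluate_blocks blocks value (evaluate_blocks blocks value)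

-- ===== LEMMAS AND PROOFS =====

-- Column-wise Horner value for column j (B's inner loop), used in the proofs.
def pvCol (value : Int) (blocks : List (List Int)) (j : Nat) : Int :=
  blocks.foldr (fun row s => s * value + row.getD j 0) 0

-- Loop invariant for A: starting from `init` with coefficient `c`, the forward
-- fold produces, at each index j, init[j] + c * pvCol(blocks, j).
theorem pvA_loop (value : Int) (blocks : List (List Int)) (init : List Int) (c : Int)
    (h : ∀ r ∈ blocks, init.length ≤ r.length) :
    (blocks.foldl
      (fun (st : List Int × Int) row =>
        (List.zipWith (fun a b => a + st.2 * b) st.1 row, st.2 * value))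
      (init, c)).1
    = (List.range init.length).map (fun j => init.getD j 0 + c * pvCol value blocks j) := by
  induction blocks generalizing init c with
  | nil =>
    apply List.ext_getElem
    · simp
    · intro i h1 h2
      have hi : i < init.length := by simpa using h1
      simp [pvCol, List.getD_eq_getElem?_getD, List.getElem?_eq_getElem hi]
  | cons r rs ih =>
    have hr : init.length ≤ r.length := h r (by simp)
    have hlen : (List.zipWith (fun a b => a + c * b) init r).length = init.length := by
      simp; omega
    have hrs : ∀ x ∈ rs, (List.zipWith (fun a b => a + c * b) init r).length ≤ x.length := by
      intro x hx; rw [hlen]; exact h x (by simp [hx])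
    simp only [List.foldl_cons]
    rw [ih _ _ hrs, hlen]
    apply List.ext_getElem
    · simp
    · intro i h1 h2
      have hi : i < init.length := by simpa using h1
      have hir : i < r.length := lt_of_lt_of_le hi hr
      simp only [List.getElem_map, List.getElem_range, pvCol, List.foldr_cons,
        List.getD_eq_getElem?_getD, List.getElem?_zipWith,
        List.getElem?_eq_getElem hi, List.getElem?_eq_getElem hir]
      simp only [Option.getD_some]
      show init[i] + c * r[i] + c * value * _ = init[i] + c * (_ * value + r[i])
      ring

theorem evaluate_blocks_eq (blocks : List (List Int)) (value : Int)
    (hpre : Pre_evaluate_blocks blocks value) :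
    evaluate_blocks blocks value = evaluate_blocks_alt blocks value := by
  obtain ⟨hne, hlen⟩ := hpre
  set w := (blocks.headD []).length with hw
  have h' : ∀ r ∈ blocks, (List.replicate w (0 : Int)).length ≤ r.length := by
    intro r hr; simpa using hlen r hr
  have := pvA_loop value blocks (List.replicate w 0) 1 h'
  simp only [List.length_replicate] at this
  show (blocks.foldl _ (List.replicate w 0, 1)).1 = _
  rw [this]
  apply List.map_congr_left
  intro j hj
  simp only [List.mem_range] at hj
  simp [List.getD_eq_getElem?_getD, hj, pvCol]

-- ===== VERDICT =====
theorem evaluate_blocks_spec : Claim_equal_evaluate_blocks := by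
  intro blocks value _ hpre
  exact evaluate_blocks_eq blocks value hpre
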